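-- pv_equiv track=rewrite | github.com/epoyraz/leetcode | solutions/3522.py | resultsArray
-- ===== SOURCE A (Python) =====
-- def resultsArray(nums, k):
--     """
--     :type nums: List[int]
--     :type k: int
--     :rtype: List[int]
--     """
--     n = len(nums)
--     res = []
--     for i in range(n - k + 1):
--         window = nums[i:i+k]
--         good = True
--         # Check strictly ascending by 1
--         for j in range(1, k):
--             if window[j] != window[j-1] + 1:
--                 good = False
--                 break
--         if good:
--             res.append(window[-1])
--         else:
--             res.append(-1)
--     return res
-- ===== SOURCE B (Python) =====
-- def resultsArray(nums, k):
--     """Single pass: track the length of the consecutive(+1) run ending at each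
--     index; the window ending at i is good iff that run length is >= k."""
--     n = len(nums)
--     res = []
--     run = 1
--     for i in range(n):
--         if i > 0 and nums[i] == nums[i - 1] + 1:
--             run += 1
--         else:
--             run = 1
--         if i >= k - 1:
--             res.append(nums[i] if run >= k else -1)
--     return res
-- ===== Notes on version B (the rewrite author's own statement) =====
-- stated objective: faster
-- what changed: Replaced the per-window rescan (slice each window and re-check all k adjacent pairs) by a single left-to-right pass that maintains the length of the consecutive-increment run ending at each index; a window is good iff that run length is at least k.
import Mathlib
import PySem

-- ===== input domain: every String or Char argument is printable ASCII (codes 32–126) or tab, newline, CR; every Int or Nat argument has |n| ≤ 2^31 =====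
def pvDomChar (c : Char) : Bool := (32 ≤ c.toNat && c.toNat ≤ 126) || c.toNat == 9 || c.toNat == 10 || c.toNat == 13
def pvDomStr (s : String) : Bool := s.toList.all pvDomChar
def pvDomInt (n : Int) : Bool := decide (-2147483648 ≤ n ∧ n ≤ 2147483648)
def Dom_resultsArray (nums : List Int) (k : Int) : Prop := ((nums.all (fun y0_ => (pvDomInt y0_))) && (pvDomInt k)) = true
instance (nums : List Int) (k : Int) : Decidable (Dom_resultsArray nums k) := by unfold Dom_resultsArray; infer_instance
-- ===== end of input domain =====

-- B replaces A's per-window O(k) rescan by a single pass tracking the length of the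
-- consecutive(+1) run ending at each index (window good iff run >= k): O(n*k) -> O(n).


-- ===== PORT A =====
-- inner 'for j in range(1, k)' with break; window[j] / window[j-1] are in range under Pre_ (1 ≤ k),
-- so pyGetD is exact there
def pvGoodLoop (window : List Int) : List Int → Bool
  | [] => true
  | j :: js =>
      if PySem.List.pyGetD window j 0 ≠ PySem.List.pyGetD window (j - 1) 0 + 1 then false
      else pvGoodLoop window js

-- window[-1]: under Pre_ (1 ≤ k) the window is nonempty, so pyGetD is exact there
def resultsArray (nums : List Int) (k : Int) : List Int :=
  let n : Int := nums.length
  (PySem.List.pyRange 0 (n - k + 1) 1).foldl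
    (fun res i =>
      let window := PySem.List.slice nums (some i) (some (i + k))
      let good := pvGoodLoop window (PySem.List.pyRange 1 k 1)
      if good then res ++ [PySem.List.pyGetD window (-1) 0] else res ++ [(-1 : Int)])
    []

-- ===== PORT B =====
def resultsArray_alt (nums : List Int) (k : Int) : List Int :=
  let n : Int := nums.length
  ((PySem.List.pyRange 0 n 1).foldl
    (fun (st : List Int × Int) i =>
      let run : Int :=
        if 0 < i ∧ PySem.List.pyGetD nums i 0 = PySem.List.pyGetD nums (i - 1) 0 + 1
        then st.2 + 1 else 1
      let res :=
        if k - 1 ≤ i then st.1 ++ [if k ≤ run then PySem.List.pyGetD nums i 0 else -1] else st.1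
      (res, run))
    (([] : List Int), (1 : Int))).1

-- ===== PRECONDITION & SPEC =====
-- Pre_ excludes exactly k ≤ 0, where A raises IndexError (window[-1] on an empty slice)
def Pre_resultsArray (nums : List Int) (k : Int) : Prop := 1 ≤ k
instance (nums : List Int) (k : Int) : Decidable (Pre_resultsArray nums k) := by
  unfold Pre_resultsArray; infer_instance

def pvWitness_resultsArray : List Int × Int := ([1, 2, 3], 2)

def Spec_resultsArray (nums : List Int) (k : Int) (out : List Int) : Prop := out = resultsArray_alt nums k
instance (nums : List Int) (k : Int) (out : List Int) : Decidable (Spec_resultsArray nums k out) := by unfold Spec_resultsArray; infer_instance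

-- ===== CLAIM (what is proved, stated in full; the proofs are below) =====
def Claim_equal_resultsArray : Prop := ∀ (nums : List Int) (k : Int), Dom_resultsArray nums k → Pre_resultsArray nums k → Spec_resultsArray nums k (resultsArray nums k)

-- ===== LEMMAS AND PROOFS =====

-- length of the consecutive(+1) run of nums ending at index i
def runV (nums : List Int) : Nat → Int
  | 0 => 1
  | i + 1 => if nums.getD (i + 1) 0 = nums.getD i 0 + 1 then runV nums i + 1 else 1

-- fA: what A produces for window start i
def fA (nums : List Int) (k : Int) (i : Int) : Int :=
  if pvGoodLoop (PySem.List.slice nums (some i) (some (i + k))) (PySem.List.pyRange 1 k 1)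
  then PySem.List.pyGetD (PySem.List.slice nums (some i) (some (i + k))) (-1) 0 else -1

-- fB: what B appends at index i
def fB (nums : List Int) (k : Int) (i : Int) : Int :=
  if k ≤ runV nums i.toNat then nums.getD i.toNat 0 else -1

lemma A_eq_map (nums : List Int) (k : Int) :
    resultsArray nums k =
      (PySem.List.pyRange 0 ((nums.length : Int) - k + 1) 1).map (fA nums k) := by
  simp only [resultsArray]
  rw [← List.nil_append (List.map (fA nums k) (PySem.List.pyRange 0 ((nums.length : Int) - k + 1) 1)),
     ← PySem.List.foldl_append_singleton_eq_map (fA nums k) _ []]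
  congr 1
  funext res i
  simp only [fA]
  split <;> rfl

lemma foldB (nums : List Int) (k : Int) (hk : 1 ≤ k) (m : Nat) :
    (PySem.List.pyRange 0 (m : Int) 1).foldl
      (fun (st : List Int × Int) i =>
        let run : Int :=
          if 0 < i ∧ PySem.List.pyGetD nums i 0 = PySem.List.pyGetD nums (i - 1) 0 + 1
          then st.2 + 1 else 1
        let res :=
          if k - 1 ≤ i then st.1 ++ [if k ≤ run then PySem.List.pyGetD nums i 0 else -1] else st.1
        (res, run))
      (([] : List Int), (1 : Int))
    = ((PySem.List.pyRange (k - 1) (m : Int) 1).map (fB nums k),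
       match m with | 0 => 1 | j + 1 => runV nums j) := by
  induction m with
  | zero =>
      rw [PySem.List.pyRange_one_eq_nil (by omega), PySem.List.pyRange_one_eq_nil (by push_cast; omega)]
      rfl
  | succ m ih =>
      have hcast : ((m + 1 : Nat) : Int) = (m : Int) + 1 := by push_cast; ring
      rw [hcast, PySem.List.pyRange_one_succ_right (by positivity), List.foldl_append, ih]
      simp only [List.foldl_cons, List.foldl_nil]
      have hrun : (if 0 < (m : Int) ∧ PySem.List.pyGetD nums (m : Int) 0 = PySem.List.pyGetD nums ((m : Int) - 1) 0 + 1
          then (match m with | 0 => (1:Int) | j + 1 => runV nums j) + 1 else 1) = runV nums m := by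
        match m with
        | 0 => simp [runV]
        | j + 1 =>
            have h1 : ((j + 1 : Nat) : Int) - 1 = (j : Int) := by push_cast; ring
            simp only [h1, PySem.List.pyGetD_natCast, runV]
            have h2 : (0:Int) < ((j+1 : Nat) : Int) := by positivity
            split
            · rename_i h; rw [if_pos h.2]
            · rename_i h; rw [if_neg (fun hc => h ⟨h2, hc⟩)]
      rw [hrun]
      by_cases hki : k - 1 ≤ (m : Int)
      · rw [if_pos hki, PySem.List.pyRange_one_succ_right hki, List.map_append]
        have : (if k ≤ runV nums m then PySem.List.pyGetD nums (m : Int) 0 else -1) = fB nums k (m : Int) := by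
          simp [fB, PySem.List.pyGetD_natCast]
        rw [this]
        simp
      · rw [if_neg hki, PySem.List.pyRange_one_eq_nil (by omega),
            PySem.List.pyRange_one_eq_nil (by omega)]

lemma B_eq_map (nums : List Int) (k : Int) (hk : 1 ≤ k) :
    resultsArray_alt nums k = (PySem.List.pyRange (k - 1) (nums.length : Int) 1).map (fB nums k) := by
  simp only [resultsArray_alt]
  rw [foldB nums k hk nums.length]

lemma runV_pos (nums : List Int) (i : Nat) : 1 ≤ runV nums i := by
  induction i with
  | zero => simp [runV]
  | succ j ih => simp only [runV]; split <;> omega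

lemma runV_ge (nums : List Int) (i t : Nat) :
    ((t : Int) + 1 ≤ runV nums i) ↔
      (t ≤ i ∧ ∀ d : Nat, d < t → nums.getD (i - d) 0 = nums.getD (i - d - 1) 0 + 1) := by
  induction i generalizing t with
  | zero =>
      simp only [runV]
      constructor
      · intro h
        have ht : t = 0 := by omega
        subst ht; exact ⟨le_refl 0, by omega⟩
      · rintro ⟨h1, _⟩
        have ht : t = 0 := by omega
        subst ht; omega
  | succ i ih =>
      simp only [runV]
      split
      · rename_i hc
        match t with
        | 0 =>
            have := runV_pos nums i
            constructor
            · intro _; exact ⟨by omega, by omega⟩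
            · intro _; push_cast; omega
        | s + 1 =>
            have hs : ((s + 1 : Nat) : Int) + 1 ≤ runV nums i + 1 ↔ ((s : Nat) : Int) + 1 ≤ runV nums i := by
              push_cast; omega
            rw [hs, ih s]
            constructor
            · rintro ⟨h1, h2⟩
              refine ⟨by omega, ?_⟩
              intro d hd
              match d with
              | 0 => simpa using hc
              | e + 1 =>
                  have h3 : i + 1 - (e + 1) = i - e := by omega
                  rw [h3]; exact h2 e (by omega)
            · rintro ⟨h1, h2⟩
              refine ⟨by omega, ?_⟩
              intro e he
              have h3 : i - e = i + 1 - (e + 1) := by omega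
              rw [h3]; exact h2 (e + 1) (by omega)
      · rename_i hc
        constructor
        · intro h
          have ht : t = 0 := by omega
          subst ht; exact ⟨by omega, by omega⟩
        · rintro ⟨h1, h2⟩
          match t with
          | 0 => omega
          | s + 1 =>
              exfalso
              have := h2 0 (by omega)
              simp at this
              exact hc this

lemma goodLoop_iff (window : List Int) (js : List Int) :
    pvGoodLoop window js = true ↔
      ∀ j ∈ js, PySem.List.pyGetD window j 0 = PySem.List.pyGetD window (j - 1) 0 + 1 := by
  induction js with
  | nil => simp [pvGoodLoop]
  | cons j js ih =>
      simp only [pvGoodLoop]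
      split
      · simp only [List.mem_cons]
        constructor
        · intro h; cases h
        · intro h; exact absurd (h j (Or.inl rfl)) (by assumption)
      · simp_all [List.mem_cons]

lemma pointwise (nums : List Int) (k : Int) (hk : 1 ≤ k) (s : Nat)
    (hs : (s : Int) + k ≤ (nums.length : Int)) :
    fA nums k (s : Int) = fB nums k (k - 1 + (s : Int)) := by
  have hk' : ((k.toNat : Nat) : Int) = k := by omega
  set K : Nat := k.toNat with hKdef
  have hK1 : 1 ≤ K := by omega
  have hsK : s + K ≤ nums.length := by omega
  simp only [fA, fB]
  rw [← hk', PySem.List.slice_natCast_add]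
  have hlen : ((nums.drop s).take K).length = K := by
    simp [List.length_take, List.length_drop]; omega
  have hwin : ∀ t : Nat, t < K → ((nums.drop s).take K).getD t 0 = nums.getD (s + t) 0 := by
    intro t ht
    simp [List.getD, List.getElem?_drop, ht]
  have htn : ((K : Int) - 1 + (s : Int)).toNat = s + K - 1 := by omega
  rw [htn]
  have hcond : pvGoodLoop ((nums.drop s).take K) (PySem.List.pyRange 1 (K : Int) 1) = true ↔
      ((K : Int) ≤ runV nums (s + K - 1)) := by
    rw [goodLoop_iff]
    have step2 : ((K : Int) ≤ runV nums (s + K - 1)) ↔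
        (K - 1 ≤ s + K - 1 ∧ ∀ d : Nat, d < K - 1 →
          nums.getD (s + K - 1 - d) 0 = nums.getD (s + K - 1 - d - 1) 0 + 1) := by
      have := runV_ge nums (s + K - 1) (K - 1)
      have hc : (((K - 1 : Nat)) : Int) + 1 = (K : Int) := by omega
      rw [hc] at this
      exact this
    rw [step2]
    constructor
    · intro H
      refine ⟨by omega, ?_⟩
      intro d hd
      have h1 : s + K - 1 - d = s + (K - 2 - d) + 1 := by omega
      rw [h1, show s + (K - 2 - d) + 1 - 1 = s + (K - 2 - d) from by omega]
      have hj : ((K - 2 - d + 1 : Nat) : Int) ∈ PySem.List.pyRange 1 (K : Int) 1 := by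
        rw [PySem.List.mem_pyRange_one]; constructor <;> [omega; (push_cast; omega)]
      have := H _ hj
      rw [PySem.List.pyGetD_natCast, hwin _ (by omega)] at this
      have hm1 : ((K - 2 - d + 1 : Nat) : Int) - 1 = ((K - 2 - d : Nat) : Int) := by push_cast; omega
      rw [hm1, PySem.List.pyGetD_natCast, hwin _ (by omega)] at this
      rw [show s + (K - 2 - d) + 1 = s + (K - 2 - d + 1) from by omega]
      exact this
    · rintro ⟨-, Q⟩
      intro j hj
      rw [PySem.List.mem_pyRange_one] at hj
      obtain ⟨hj1, hj2⟩ := hj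
      have hd : j = ((j.toNat - 1 + 1 : Nat) : Int) := by omega
      rw [hd, PySem.List.pyGetD_natCast, hwin _ (by omega)]
      have hm1 : ((j.toNat - 1 + 1 : Nat) : Int) - 1 = ((j.toNat - 1 : Nat) : Int) := by push_cast; omega
      rw [hm1, PySem.List.pyGetD_natCast, hwin _ (by omega)]
      have := Q (K - 2 - (j.toNat - 1)) (by omega)
      have e1 : s + K - 1 - (K - 2 - (j.toNat - 1)) = s + (j.toNat - 1 + 1) := by omega
      rw [e1, show s + (j.toNat - 1 + 1) - 1 = s + (j.toNat - 1) from by omega] at this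
      exact this
  by_cases hgood : (K : Int) ≤ runV nums (s + K - 1)
  · rw [if_pos (hcond.mpr hgood), if_pos hgood]
    have hne : (nums.drop s).take K ≠ [] := by
      intro h; rw [h] at hlen; simp at hlen; omega
    rw [PySem.List.pyGetD_neg_one _ _ hne, List.getLast_eq_getElem, ← List.getD_eq_getElem _ 0 (by rw [hlen]; omega)]
    rw [hlen, hwin _ (by omega)]
    congr 1
    omega
  · rw [if_neg (fun h => hgood (hcond.mp h)), if_neg hgood]

-- ===== VERDICT (by name: the statement is the Claim_ definition above) =====
theorem resultsArray_spec : Claim_equal_resultsArray := by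
  intro nums k _ hk
  unfold Spec_resultsArray
  rw [A_eq_map, B_eq_map nums k hk]
  rw [PySem.List.pyRange_one 0 ((nums.length : Int) - k + 1),
      PySem.List.pyRange_one (k - 1) (nums.length : Int)]
  have hM : ((nums.length : Int) - k + 1 - 0).toNat = ((nums.length : Int) - (k - 1)).toNat := by omega
  rw [hM]
  simp only [List.map_map]
  refine List.map_congr_left ?_
  intro t ht
  rw [List.mem_range] at ht
  simp only [Function.comp_apply, zero_add]
  exact pointwise nums k hk t (by omega)
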